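/- GENERATED by tools/mkcompositions.py from design/units.gif.tsv (unit `DGifDecreaseImageCounter.COMPOSITION`) — do not edit.
   THE PROOF of the composition unit `DGifDecreaseImageCounter.COMPOSITION`: the 4 segments of `DGifDecreaseImageCounter` chain into its contract, by the theorem
   `Gif.Spec.DGifDecreaseImageCounter.compose` (proved next to the cut assertions). -/
import Gif.Spec.Units.DGifDecreaseImageCounter_COMPOSITION

/-- The segments of `DGifDecreaseImageCounter` compose into its contract. -/
theorem Gif.Spec.Proved.DGifDecreaseImageCounter_COMPOSITION_ok : Gif.Spec.DGifDecreaseImageCounter_COMPOSITION.Statement := by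
  intro Lay _hLay μ _hμ u₀ h_DGifDecreaseImageCounter_1 h_DGifDecreaseImageCounter_2 h_DGifDecreaseImageCounter_3 h_DGifDecreaseImageCounter_E
  apply Gif.Spec.DGifDecreaseImageCounter.compose
  all_goals assumption
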